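-- pv_equiv track=rewrite | github.com/Greenun/algorithmPractice | programmers/card_game.py | solution
-- ===== SOURCE A (Python) =====
-- def solution(left, right):
--     dp = [[0]*(len(right)+1) for _ in range(len(left)+1)]
--     # 큰 수부터 하면 안되는
--     for i in range(len(left)-1, -1, -1):
--         for j in range(len(right)-1, -1, -1):
--             if left[i] > right[j]:
--                 dp[i][j] = dp[i][j+1] + right[j]
--             else:
--                 dp[i][j] = max(dp[i+1][j+1], dp[i+1][j])
--     return dp[0][0]
-- ===== SOURCE B (Python) =====
-- def solution(left, right):
--     # Top-down memoized recursion over the same recurrence (B; dict memo, no table).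
--     memo = {}
--
--     def f(i, j):
--         if i == len(left) or j == len(right):
--             return 0
--         if (i, j) in memo:
--             return memo[(i, j)]
--         if left[i] > right[j]:
--             res = f(i, j + 1) + right[j]
--         else:
--             res = max(f(i + 1, j + 1), f(i + 1, j))
--         memo[(i, j)] = res
--         return res
--
--     return f(0, 0)
-- ===== Notes on version B (the rewrite author's own statement) =====
-- stated objective: alternative
-- what changed: Replaced the bottom-up (n+1)x(m+1) DP table filled by two reversed index loops with a top-down memoized recursion on (i, j) that only evaluates reachable states.
import Mathlib
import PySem

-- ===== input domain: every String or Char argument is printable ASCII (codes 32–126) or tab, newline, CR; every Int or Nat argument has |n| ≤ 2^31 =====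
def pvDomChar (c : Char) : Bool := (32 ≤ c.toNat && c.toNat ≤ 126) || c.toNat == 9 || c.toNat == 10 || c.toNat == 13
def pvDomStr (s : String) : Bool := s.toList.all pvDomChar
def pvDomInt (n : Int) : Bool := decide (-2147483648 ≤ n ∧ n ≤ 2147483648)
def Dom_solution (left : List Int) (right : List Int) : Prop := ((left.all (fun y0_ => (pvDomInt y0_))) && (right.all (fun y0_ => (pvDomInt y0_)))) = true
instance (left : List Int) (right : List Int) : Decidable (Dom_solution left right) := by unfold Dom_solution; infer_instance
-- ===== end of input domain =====

-- B replaces A's bottom-up DP table with a top-down recursion on the same recurrence (alternative decomposition).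

-- ===== PORT A =====
-- dp[i][j] read/write; in A every index is in range, so getD's default is never used.
def pvGet2 (dp : List (List Int)) (i j : Nat) : Int := (dp.getD i []).getD j 0
def pvSet2 (dp : List (List Int)) (i j : Nat) (v : Int) : List (List Int) :=
  dp.set i ((dp.getD i []).set j v)

-- body of A's inner loop (the assignment dp[i][j] = …)
def innerStep (left right : List Int) (i : Nat) (dp : List (List Int)) (j : Nat) : List (List Int) :=
  if left.getD i 0 > right.getD j 0 then
    pvSet2 dp i j (pvGet2 dp i (j+1) + right.getD j 0)
  else
    pvSet2 dp i j (max (pvGet2 dp (i+1) (j+1)) (pvGet2 dp (i+1) j))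

-- body of A's outer loop: 'for j in range(len(right)-1, -1, -1)' iterates j = m-1 … 0, i.e. (List.range m).reverse
def outerStep (left right : List Int) (dp : List (List Int)) (i : Nat) : List (List Int) :=
  ((List.range right.length).reverse).foldl (innerStep left right i) dp

def solution (left : List Int) (right : List Int) : Int :=
  pvGet2
    (((List.range left.length).reverse).foldl (outerStep left right)
      (List.replicate (left.length + 1) (List.replicate (right.length + 1) (0 : Int))))
    0 0

-- ===== PORT B =====
-- B's recursive helper f(i, j), ported structurally over the list suffixes (B's dict memo is a
-- cache computing the same values; the port computes them directly).
def solutionAltF : List Int → List Int → Int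
  | [], _ => 0
  | _ :: _, [] => 0
  | l :: ls, r :: rs =>
    if l > r then solutionAltF (l :: ls) rs + r
    else max (solutionAltF ls rs) (solutionAltF ls (r :: rs))
termination_by a b => a.length + b.length
decreasing_by all_goals (simp only [List.length_cons]; omega)

def solution_alt (left : List Int) (right : List Int) : Int := solutionAltF left right

-- ===== PRECONDITION & SPEC =====
def Spec_solution (left : List Int) (right : List Int) (out : Int) : Prop := out = solution_alt left right
instance (left : List Int) (right : List Int) (out : Int) : Decidable (Spec_solution left right out) := by unfold Spec_solution; infer_instance

-- ===== CLAIM (what is proved, stated in full; the proofs are below) =====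
def Claim_equal_solution : Prop := ∀ (left : List Int) (right : List Int), Dom_solution left right → Spec_solution left right (solution left right)

-- ===== LEMMAS AND PROOFS =====

-- the value B computes from suffixes i, j
def pvF (left right : List Int) (i j : Nat) : Int := solutionAltF (left.drop i) (right.drop j)

def rowSpec (left right : List Int) (i : Nat) : List Int :=
  (List.range (right.length + 1)).map (fun j => pvF left right i j)

-- row i during the inner loop: columns ≥ t already filled, the rest still 0
def partRow (left right : List Int) (i t : Nat) : List Int :=
  (List.range (right.length + 1)).map (fun j => if t ≤ j then pvF left right i j else 0)

-- dp during the inner loop at row i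
def dpSt (left right : List Int) (i t : Nat) : List (List Int) :=
  (List.range (left.length + 1)).map (fun k =>
    if k = i then partRow left right i t
    else if i + 1 ≤ k then rowSpec left right k
    else List.replicate (right.length + 1) 0)

-- dp after the outer loop has processed all rows ≥ i
def dpSpec (left right : List Int) (i : Nat) : List (List Int) :=
  (List.range (left.length + 1)).map (fun k =>
    if i ≤ k then rowSpec left right k else List.replicate (right.length + 1) 0)

theorem solutionAltF_nil_right (x : List Int) : solutionAltF x [] = 0 := by
  cases x <;> simp [solutionAltF]

theorem pvF_left_end (left right : List Int) (i j : Nat) (h : left.length ≤ i) :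
    pvF left right i j = 0 := by
  unfold pvF
  rw [List.drop_eq_nil_of_le h]
  simp [solutionAltF]

theorem pvF_right_end (left right : List Int) (i j : Nat) (h : right.length ≤ j) :
    pvF left right i j = 0 := by
  unfold pvF
  rw [List.drop_eq_nil_of_le h, solutionAltF_nil_right]

-- B's recurrence, phrased at indices
theorem pvF_rec (left right : List Int) (i j : Nat) (hi : i < left.length) (hj : j < right.length) :
    pvF left right i j =
      if left.getD i 0 > right.getD j 0 then pvF left right i (j+1) + right.getD j 0
      else max (pvF left right (i+1) (j+1)) (pvF left right (i+1) j) := by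
  unfold pvF
  rw [List.getD_eq_getElem left 0 hi, List.getD_eq_getElem right 0 hj]
  conv_lhs => rw [List.drop_eq_getElem_cons hi, List.drop_eq_getElem_cons hj]
  simp only [solutionAltF]
  rw [← List.drop_eq_getElem_cons hi, ← List.drop_eq_getElem_cons hj]

theorem getD_map_range {α : Type} (N k : Nat) (g : Nat → α) (d : α) :
    ((List.range N).map g).getD k d = if k < N then g k else d := by
  rcases Nat.lt_or_ge k N with h | h
  · rw [if_pos h, List.getD_eq_getElem _ _ (by simpa using h)]
    simp
  · rw [if_neg (by omega)]
    apply List.getD_eq_default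
    simpa using h

theorem set_map_range {α : Type} (N k : Nat) (g : Nat → α) (v : α) :
    ((List.range N).map g).set k v = (List.range N).map (fun x => if x = k then v else g x) := by
  apply List.ext_getElem
  · simp
  · intro n h1 h2
    simp only [List.getElem_set, List.getElem_map, List.getElem_range]
    simp only [List.length_set, List.length_map, List.length_range] at h1
    by_cases hn : n = k <;> simp [hn, Ne.symm]

theorem dpSt_zero (left right : List Int) (i : Nat) :
    dpSt left right i 0 = dpSpec left right i := by
  unfold dpSt dpSpec partRow rowSpec
  congr 1
  funext k
  by_cases hk : k = i
  · subst hk; simp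
  · simp only [hk, if_false]
    split_ifs <;> first | rfl | omega

theorem partRow_top (left right : List Int) (i : Nat) :
    partRow left right i right.length = List.replicate (right.length + 1) 0 := by
  apply List.ext_getElem
  · simp [partRow]
  · intro n h1 h2
    simp only [partRow, List.length_map, List.length_range] at h1
    simp only [partRow, List.getElem_map, List.getElem_range, List.getElem_replicate]
    split
    · exact pvF_right_end _ _ _ _ (by omega)
    · rfl

theorem dpSt_top (left right : List Int) (i : Nat) :
    dpSt left right i right.length = dpSpec left right (i+1) := by
  unfold dpSt dpSpec
  congr 1
  funext k
  by_cases hk : k = i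
  · subst hk; rw [partRow_top]; simp
  · simp [hk]

theorem rowSpec_end (left right : List Int) (k : Nat) (h : left.length ≤ k) :
    rowSpec left right k = List.replicate (right.length + 1) 0 := by
  apply List.ext_getElem
  · simp [rowSpec]
  · intro n h1 h2
    simp only [rowSpec, List.getElem_map, List.getElem_range, List.getElem_replicate]
    exact pvF_left_end _ _ _ _ h

theorem init_eq (left right : List Int) :
    List.replicate (left.length + 1) (List.replicate (right.length + 1) (0 : Int)) =
      dpSpec left right left.length := by
  apply List.ext_getElem
  · simp [dpSpec]
  · intro n h1 h2
    simp only [dpSpec, List.getElem_map, List.getElem_range, List.getElem_replicate]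
    split
    · rw [rowSpec_end _ _ _ (by omega)]
    · rfl

theorem reverse_range_succ (n : Nat) : (List.range (n+1)).reverse = n :: (List.range n).reverse := by
  simp [List.range_succ]

theorem innerStep_eq (left right : List Int) (i j : Nat)
    (hi : i < left.length) (hj : j < right.length) :
    innerStep left right i (dpSt left right i (j+1)) j = dpSt left right i j := by
  have hrow : (dpSt left right i (j+1)).getD i [] = partRow left right i (j+1) := by
    unfold dpSt; rw [getD_map_range]; simp [Nat.lt_succ_of_lt hi]
  have hrow1 : (dpSt left right i (j+1)).getD (i+1) [] = rowSpec left right (i+1) := by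
    unfold dpSt; rw [getD_map_range]
    have : i + 1 < left.length + 1 := by omega
    simp [this]
  have hg1 : pvGet2 (dpSt left right i (j+1)) i (j+1) = pvF left right i (j+1) := by
    unfold pvGet2; rw [hrow]; unfold partRow; rw [getD_map_range]
    have : j + 1 < right.length + 1 := by omega
    simp [this]
  have hg2 : pvGet2 (dpSt left right i (j+1)) (i+1) (j+1) = pvF left right (i+1) (j+1) := by
    unfold pvGet2; rw [hrow1]; unfold rowSpec; rw [getD_map_range]
    have : j + 1 < right.length + 1 := by omega
    simp [this]
  have hg3 : pvGet2 (dpSt left right i (j+1)) (i+1) j = pvF left right (i+1) j := by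
    unfold pvGet2; rw [hrow1]; unfold rowSpec; rw [getD_map_range]
    have : j < right.length + 1 := by omega
    simp [this]
  have hrowset : (partRow left right i (j+1)).set j (pvF left right i j) = partRow left right i j := by
    unfold partRow
    rw [set_map_range]
    congr 1
    funext x
    by_cases hx : x = j
    · subst hx; simp
    · simp only [hx, if_false]
      split_ifs <;> first | rfl | omega
  have hset : pvSet2 (dpSt left right i (j+1)) i j (pvF left right i j) = dpSt left right i j := by
    unfold pvSet2
    rw [hrow, hrowset]
    unfold dpSt
    rw [set_map_range]
    congr 1
    funext k
    by_cases hk : k = i <;> simp [hk]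
  unfold innerStep
  split_ifs with hc
  · have hv : pvF left right i (j+1) + right.getD j 0 = pvF left right i j := by
      rw [pvF_rec left right i j hi hj, if_pos hc]
    rw [hg1, hv, hset]
  · have hv : max (pvF left right (i+1) (j+1)) (pvF left right (i+1) j) = pvF left right i j := by
      rw [pvF_rec left right i j hi hj, if_neg hc]
    rw [hg2, hg3, hv, hset]

theorem inner_fold (left right : List Int) (i : Nat) (hi : i < left.length) :
    ∀ t, t ≤ right.length →
      ((List.range t).reverse).foldl (innerStep left right i) (dpSt left right i t) =
        dpSt left right i 0 := by
  intro t
  induction t with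
  | zero => intro _; simp
  | succ t ih =>
    intro ht
    rw [reverse_range_succ, List.foldl_cons, innerStep_eq left right i t hi (by omega)]
    exact ih (by omega)

theorem outerStep_eq (left right : List Int) (i : Nat) (hi : i < left.length) :
    outerStep left right (dpSpec left right (i+1)) i = dpSpec left right i := by
  unfold outerStep
  rw [← dpSt_top, inner_fold left right i hi right.length le_rfl, dpSt_zero]

theorem outer_fold (left right : List Int) :
    ∀ i, i ≤ left.length →
      ((List.range i).reverse).foldl (outerStep left right) (dpSpec left right i) =
        dpSpec left right 0 := by
  intro i
  induction i with
  | zero => intro _; simp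
  | succ i ih =>
    intro hi
    rw [reverse_range_succ, List.foldl_cons, outerStep_eq left right i (by omega)]
    exact ih (by omega)

theorem solution_eq_alt (left right : List Int) : solution left right = solution_alt left right := by
  unfold solution
  rw [init_eq, outer_fold left right left.length le_rfl]
  unfold pvGet2 dpSpec
  rw [getD_map_range]
  simp only [Nat.zero_lt_succ, if_true, Nat.zero_le]
  unfold rowSpec
  rw [getD_map_range]
  simp only [Nat.zero_lt_succ, if_true]
  unfold pvF solution_alt
  simp

-- ===== VERDICT (by name: the statement is the Claim_ definition above) =====
theorem solution_spec : Claim_equal_solution := by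
  intro left right _
  unfold Spec_solution
  exact solution_eq_alt left right
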